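-- pv_equiv track=rewrite | github.com/duarteol2000/campuscalm | apps/brain/views.py | _decide_mode
-- ===== SOURCE A (Python) =====
-- TASK_CONCIERGE_ACTION = "create_task"
--
-- EVENT_CONCIERGE_ACTION = "create_event"
--
-- def _decide_mode(scores, has_pending, pending_action=None):
--     emotional_score = int(scores.get("emotional", 0))
--     if has_pending:
--         if emotional_score >= 4:
--             return "emotional_support"
--         if pending_action == EVENT_CONCIERGE_ACTION:
--             return "event"
--         if pending_action == TASK_CONCIERGE_ACTION:
--             return "task"
--         return "general"
--
--     if emotional_score >= 4:
--         return "emotional_support"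
--
--     priority = ("event", "task", "social", "general")
--     best_score = max(int(scores.get(mode, 0)) for mode in priority)
--     if best_score <= 0:
--         return "general"
--     for mode in priority:
--         if int(scores.get(mode, 0)) == best_score:
--             return mode
--     return "general"
-- ===== SOURCE B (Python) =====
-- TASK_CONCIERGE_ACTION = "create_task"
--
-- EVENT_CONCIERGE_ACTION = "create_event"
--
-- def _decide_mode(scores, has_pending, pending_action=None):
--     if int(scores.get("emotional", 0)) >= 4:
--         return "emotional_support"
--     if has_pending:
--         if pending_action == EVENT_CONCIERGE_ACTION:
--             return "event"
--         if pending_action == TASK_CONCIERGE_ACTION: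
--             return "task"
--         return "general"
--     best_mode = "general"
--     best_score = 0
--     for mode in ("event", "task", "social", "general"):
--         s = int(scores.get(mode, 0))
--         if s > best_score:
--             best_mode = mode
--             best_score = s
--     return best_mode
-- ===== Notes on version B (the rewrite author's own statement) =====
-- stated objective: simpler
-- what changed: B hoists the duplicated emotional_score>=4 check ahead of the pending branch and replaces A's max()-then-rescan argmax with a single strict-greater pass initialised to ('general', 0), which subsumes the best_score<=0 fallback.
import Mathlib
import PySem

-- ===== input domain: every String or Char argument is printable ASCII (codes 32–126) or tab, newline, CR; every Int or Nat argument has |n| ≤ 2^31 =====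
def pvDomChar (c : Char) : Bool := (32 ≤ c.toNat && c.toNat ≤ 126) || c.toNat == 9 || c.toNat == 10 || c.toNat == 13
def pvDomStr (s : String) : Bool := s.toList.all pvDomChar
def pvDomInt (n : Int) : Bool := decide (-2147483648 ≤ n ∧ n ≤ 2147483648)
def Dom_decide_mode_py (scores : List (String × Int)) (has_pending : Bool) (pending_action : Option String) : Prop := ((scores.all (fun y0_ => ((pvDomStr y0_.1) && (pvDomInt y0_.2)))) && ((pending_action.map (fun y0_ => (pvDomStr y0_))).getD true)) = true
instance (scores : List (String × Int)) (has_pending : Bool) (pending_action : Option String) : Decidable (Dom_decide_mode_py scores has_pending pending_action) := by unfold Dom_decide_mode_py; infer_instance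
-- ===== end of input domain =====

-- B hoists the duplicated emotional check before the pending branch and replaces A's max()+rescan
-- argmax with a single strict-greater pass initialised to ("general", 0); objective: simpler.

-- ===== PORT A =====
def decide_mode_py (scores : List (String × Int)) (has_pending : Bool) (pending_action : Option String) : String :=
  let emotional_score := PySem.Dict.getD (PySem.Dict.mk scores) "emotional" 0
  if has_pending then
    if emotional_score ≥ 4 then "emotional_support"
    else if pending_action == some "create_event" then "event"
    else if pending_action == some "create_task" then "task"
    else "general"
  else if emotional_score ≥ 4 then "emotional_support"
  else
    let priority : List String := ["event", "task", "social", "general"]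
    -- max(generator) over the nonempty literal tuple; the .getD 0 branch is unreachable
    let best_score := (PySem.List.max? (priority.map (fun mode => PySem.Dict.getD (PySem.Dict.mk scores) mode 0)) (fun y => y)).getD 0
    if best_score ≤ 0 then "general"
    -- 'for mode in priority: if score == best: return mode' unrolled over the literal 4-tuple
    else if PySem.Dict.getD (PySem.Dict.mk scores) "event" 0 == best_score then "event"
    else if PySem.Dict.getD (PySem.Dict.mk scores) "task" 0 == best_score then "task"
    else if PySem.Dict.getD (PySem.Dict.mk scores) "social" 0 == best_score then "social"
    else if PySem.Dict.getD (PySem.Dict.mk scores) "general" 0 == best_score then "general"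
    else "general"

-- ===== PORT B =====
def decide_mode_py_alt (scores : List (String × Int)) (has_pending : Bool) (pending_action : Option String) : String :=
  if PySem.Dict.getD (PySem.Dict.mk scores) "emotional" 0 ≥ 4 then "emotional_support"
  else if has_pending then
    if pending_action == some "create_event" then "event"
    else if pending_action == some "create_task" then "task"
    else "general"
  else
    (List.foldl
      (fun (st : String × Int) mode =>
        let s := PySem.Dict.getD (PySem.Dict.mk scores) mode 0
        if s > st.2 then (mode, s) else st)
      ("general", 0)
      ["event", "task", "social", "general"]).1

-- ===== PRECONDITION & SPEC =====
def Spec_decide_mode_py (scores : List (String × Int)) (has_pending : Bool) (pending_action : Option String) (out : String) : Prop := out = decide_mode_py_alt scores has_pending pending_action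
instance (scores : List (String × Int)) (has_pending : Bool) (pending_action : Option String) (out : String) : Decidable (Spec_decide_mode_py scores has_pending pending_action out) := by unfold Spec_decide_mode_py; infer_instance

-- ===== CLAIM (what is proved, stated in full; the proofs are below) =====
def Claim_equal_decide_mode_py : Prop := ∀ (scores : List (String × Int)) (has_pending : Bool) (pending_action : Option String), Dom_decide_mode_py scores has_pending pending_action → Spec_decide_mode_py scores has_pending pending_action (decide_mode_py scores has_pending pending_action)

-- ===== LEMMAS AND PROOFS =====

-- ===== VERDICT (by name: the statement is the Claim_ definition above) =====
set_option maxHeartbeats 2000000 in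
theorem decide_mode_py_spec : Claim_equal_decide_mode_py := by
  intro scores has_pending pending_action _
  unfold Spec_decide_mode_py decide_mode_py decide_mode_py_alt
  cases has_pending <;>
    simp only [List.map, PySem.List.max?_id_cons, List.foldl, Option.getD,
      Bool.false_eq_true, if_false, if_true, beq_iff_eq] <;>
    generalize PySem.Dict.getD (PySem.Dict.mk scores) "emotional" 0 = e <;>
    generalize PySem.Dict.getD (PySem.Dict.mk scores) "event" 0 = a <;>
    generalize PySem.Dict.getD (PySem.Dict.mk scores) "task" 0 = b <;>
    generalize PySem.Dict.getD (PySem.Dict.mk scores) "social" 0 = c <;>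
    generalize PySem.Dict.getD (PySem.Dict.mk scores) "general" 0 = d <;>
    simp only [Int.max_def] <;>
    split_ifs <;> first | rfl | omega
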